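-- pv_equiv track=rewrite | github.com/BrysonSeiler/Latent-Semantic-Analysis-Example | walkthrough.py | singular_value_matrix
-- ===== SOURCE A (Python) =====
-- def singular_value_matrix(s,m,n):
--     matrix = []
--     temp_matrix = []
--     for row in range(0,m):
--         for col in range(0,n):
--             if row == col:
--                 temp_matrix.append(s[row])
--             else:
--                 temp_matrix.append(0)
--         matrix.append(temp_matrix)
--         temp_matrix = []
--     return matrix
-- ===== SOURCE B (Python) =====
-- def singular_value_matrix(s, m, n):
--     d = max(0, min(m, n))
--     diag = [[0] * i + [s[i]] + [0] * (n - i - 1) for i in range(d)]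
--     zeros = [[0] * n for _ in range(max(0, m - d))]
--     return diag + zeros
-- ===== Notes on version B (the rewrite author's own statement) =====
-- stated objective: alternative
-- what changed: Instead of A's nested row/column loop with a per-cell row==col test, B builds the matrix as two staged blocks: a diagonal block whose rows are concatenations of zero padding around s[i], followed by a block of all-zero rows.
import Mathlib
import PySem

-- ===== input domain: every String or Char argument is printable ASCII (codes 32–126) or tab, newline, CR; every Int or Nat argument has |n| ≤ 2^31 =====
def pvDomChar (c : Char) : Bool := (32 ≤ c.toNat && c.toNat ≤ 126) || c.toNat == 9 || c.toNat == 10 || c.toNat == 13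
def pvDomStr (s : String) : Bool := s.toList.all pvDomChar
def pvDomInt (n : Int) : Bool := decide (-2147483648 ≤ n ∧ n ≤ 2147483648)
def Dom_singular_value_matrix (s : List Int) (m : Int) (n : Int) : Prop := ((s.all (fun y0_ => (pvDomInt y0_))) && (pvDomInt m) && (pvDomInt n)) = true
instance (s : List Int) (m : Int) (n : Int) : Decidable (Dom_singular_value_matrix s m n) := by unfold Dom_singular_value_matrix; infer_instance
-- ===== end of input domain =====

-- B assembles the matrix as two staged blocks (diagonal rows built by concatenating zero padding around s[i], then all-zero rows) instead of A's nested loop with a per-cell test; alternative decomposition, same cost.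

-- ===== PORT A =====
def singular_value_matrix (s : List Int) (m : Int) (n : Int) : List (List Int) :=
  (PySem.List.pyRange 0 m 1).foldl (fun matrix row =>
    matrix ++ [(PySem.List.pyRange 0 n 1).foldl (fun tm col =>
      tm ++ [if row == col then PySem.List.pyGetD s row 0 else 0]) []]) []

-- ===== PORT B =====
-- [0]*i is List.replicate (exact: nonpositive count gives []); s[i] with 0 ≤ i < len s is pyGetD (in range under Pre_).
def singular_value_matrix_alt (s : List Int) (m : Int) (n : Int) : List (List Int) :=
  let d : Int := max 0 (min m n)
  ((PySem.List.pyRange 0 d 1).map (fun i =>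
      List.replicate i.toNat 0 ++ [PySem.List.pyGetD s i 0] ++ List.replicate (n - i - 1).toNat 0))
  ++ List.replicate (max 0 (m - d)).toNat (List.replicate n.toNat 0)

-- ===== PRECONDITION & SPEC =====
-- Pre_ excludes exactly the inputs where Python A raises IndexError (a diagonal access s[row] past the end of s); B raises there identically.
def Pre_singular_value_matrix (s : List Int) (m : Int) (n : Int) : Prop := min m n ≤ (s.length : Int)
instance (s : List Int) (m : Int) (n : Int) : Decidable (Pre_singular_value_matrix s m n) := by unfold Pre_singular_value_matrix; infer_instance
def pvWitness_singular_value_matrix : List Int × Int × Int := ([5, 7], 3, 2)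

def Spec_singular_value_matrix (s : List Int) (m : Int) (n : Int) (out : List (List Int)) : Prop := out = singular_value_matrix_alt s m n
instance (s : List Int) (m : Int) (n : Int) (out : List (List Int)) : Decidable (Spec_singular_value_matrix s m n out) := by unfold Spec_singular_value_matrix; infer_instance

-- ===== CLAIM =====
def Claim_equal_singular_value_matrix : Prop := ∀ (s : List Int) (m : Int) (n : Int), Dom_singular_value_matrix s m n → Pre_singular_value_matrix s m n → Spec_singular_value_matrix s m n (singular_value_matrix s m n)

-- ===== LEMMAS AND PROOFS =====

theorem pv_padded_getElem (a b : Nat) (v : Int) (j : Nat)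
    (h : j < (List.replicate a (0:Int) ++ v :: List.replicate b 0).length) :
    (List.replicate a (0:Int) ++ v :: List.replicate b 0)[j] = if j = a then v else 0 := by
  rcases lt_trichotomy j a with hj | hj | hj
  · rw [List.getElem_append_left (by simp [hj])]
    simp [Nat.ne_of_lt hj]
  · subst hj
    rw [List.getElem_append_right (by simp)]
    simp
  · rw [List.getElem_append_right (by simp [Nat.le_of_lt hj])]
    rw [List.getElem_cons]
    simp only [List.length_replicate]
    split_ifs with h0 h1 h2
    · omega
    · omega
    · exact absurd h2 (by omega)
    · simp

theorem pv_rowA_diag (v : Int) (i : Nat) (n : Int) (h : (i : Int) < n) :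
    (PySem.List.pyRange 0 n 1).foldl (fun tm col => tm ++ [if (i : Int) == col then v else 0]) [] =
      List.replicate i 0 ++ [v] ++ List.replicate (n - (i : Int) - 1).toNat 0 := by
  have e : List.replicate i (0:Int) ++ [v] ++ List.replicate (n - (i : Int) - 1).toNat 0
      = List.replicate i 0 ++ v :: List.replicate (n - (i : Int) - 1).toNat 0 := by simp
  rw [e, PySem.List.foldl_append_singleton_eq_map, List.nil_append, PySem.List.pyRange_one]
  apply List.ext_getElem
  · simp; omega
  · intro j h1 h2
    simp only [List.map_map, List.getElem_map, List.getElem_range, Function.comp]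
    rw [pv_padded_getElem _ _ _ _ h2]
    simp only [List.length_map, List.length_range] at h1
    by_cases hj : j = i
    · simp [hj]
    · simp only [zero_add]
      have hne : ((i : Int) == (j : Int)) = false := by simp; omega
      simp [hne]
      intro hij; exact absurd hij hj

theorem pv_rowA_zero (v : Int) (row n : Int) (h : n ≤ row) :
    (PySem.List.pyRange 0 n 1).foldl (fun tm col => tm ++ [if row == col then v else 0]) [] =
      List.replicate n.toNat 0 := by
  rw [PySem.List.foldl_append_singleton_eq_map, List.nil_append, PySem.List.pyRange_one]
  apply List.ext_getElem
  · simp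
  · intro j h1 h2
    simp only [List.map_map, List.getElem_map, List.getElem_range, Function.comp,
      List.getElem_replicate]
    simp only [List.length_map, List.length_range] at h1
    simp only [zero_add]
    have hne : (row == (j : Int)) = false := by simp; omega
    simp [hne]

-- ===== VERDICT =====
theorem singular_value_matrix_spec : Claim_equal_singular_value_matrix := by
  intro s m n _ _
  unfold Spec_singular_value_matrix singular_value_matrix singular_value_matrix_alt
  rw [PySem.List.foldl_append_singleton_eq_map, List.nil_append]
  apply List.ext_getElem
  · simp [PySem.List.length_pyRange_one]; omega
  · intro j h1 h2
    rw [List.getElem_map, PySem.List.getElem_pyRange_one]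
    simp only [zero_add]
    simp only [List.length_map, PySem.List.length_pyRange_one] at h1
    by_cases hj : j < (max 0 (min m n)).toNat
    · rw [List.getElem_append_left (by simp [PySem.List.length_pyRange_one]; omega)]
      rw [List.getElem_map, PySem.List.getElem_pyRange_one]
      simp only [zero_add]
      have ht : ((j : Int)).toNat = j := by omega
      rw [ht]
      exact pv_rowA_diag _ j n (by omega)
    · rw [List.getElem_append_right (by simp [PySem.List.length_pyRange_one]; omega)]
      rw [List.getElem_replicate]
      exact pv_rowA_zero _ (j : Int) n (by omega)
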